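-- pv_equiv track=rewrite | github.com/sean0042/Open_WikiTable | src/utils.py | parser_eval
-- ===== SOURCE A (Python) =====
-- def parser_eval(sorted, hard_positive_idx, positive_idx, acc):
--
--     if len(hard_positive_idx) == 0:
--         if all(elem in sorted[:5] for elem in positive_idx):
--             acc[0]+=1
--         if all(elem in sorted[:10] for elem in positive_idx):
--             acc[1]+=1
--         if all(elem in sorted[:20] for elem in positive_idx):
--             acc[2]+=1
--         if all(elem in sorted[:50] for elem in positive_idx):
--             acc[3]+=1
--
--
--     elif len(hard_positive_idx) == 1:
--         if hard_positive_idx[0] in sorted[:5]: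
--             acc[0]+=1
--             acc[1]+=1
--             acc[2]+=1
--             acc[3]+=1
--
--         elif hard_positive_idx[0] in sorted[:10]:
--             acc[1]+=1
--             acc[2]+=1
--             acc[3]+=1
--
--         elif hard_positive_idx[0] in sorted[:20]:
--             acc[2]+=1
--             acc[3]+=1
--
--         elif hard_positive_idx[0] in sorted[:50]:
--             acc[3]+=1
--
--     else:
--         if any(elem in sorted[:5] for elem in hard_positive_idx):
--             acc[0]+=1
--         if any(elem in sorted[:10] for elem in hard_positive_idx):
--              acc[1]+=1
--         if any(elem in sorted[:20] for elem in hard_positive_idx):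
--             acc[2]+=1
--         if any(elem in sorted[:50] for elem in hard_positive_idx):
--             acc[3]+=1
--
--     return acc
-- ===== SOURCE B (Python) =====
-- def parser_eval(sorted, hard_positive_idx, positive_idx, acc):
--     # rank of each element = index of its first occurrence; ABSENT for missing
--     rank = {}
--     for i, e in enumerate(sorted):
--         if e not in rank:
--             rank[e] = i
--     ABSENT = 1 << 62
--     if len(hard_positive_idx) == 0:
--         m = max((rank.get(e, ABSENT) for e in positive_idx), default=-1)
--     else:
--         m = min((rank.get(e, ABSENT) for e in hard_positive_idx), default=ABSENT)
--     for i, k in enumerate((5, 10, 20, 50)):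
--         if m < k:
--             acc[i] += 1
--     return acc
-- ===== Notes on version B (the rewrite author's own statement) =====
-- stated objective: simpler
-- what changed: B computes one number m (the best/worst first-occurrence rank of the relevant ids in the ranked list, via a first-occurrence dict) and updates the four counters with a single threshold loop 'm < k', replacing A's three separate branches full of prefix slices and membership scans.
import Mathlib
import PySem

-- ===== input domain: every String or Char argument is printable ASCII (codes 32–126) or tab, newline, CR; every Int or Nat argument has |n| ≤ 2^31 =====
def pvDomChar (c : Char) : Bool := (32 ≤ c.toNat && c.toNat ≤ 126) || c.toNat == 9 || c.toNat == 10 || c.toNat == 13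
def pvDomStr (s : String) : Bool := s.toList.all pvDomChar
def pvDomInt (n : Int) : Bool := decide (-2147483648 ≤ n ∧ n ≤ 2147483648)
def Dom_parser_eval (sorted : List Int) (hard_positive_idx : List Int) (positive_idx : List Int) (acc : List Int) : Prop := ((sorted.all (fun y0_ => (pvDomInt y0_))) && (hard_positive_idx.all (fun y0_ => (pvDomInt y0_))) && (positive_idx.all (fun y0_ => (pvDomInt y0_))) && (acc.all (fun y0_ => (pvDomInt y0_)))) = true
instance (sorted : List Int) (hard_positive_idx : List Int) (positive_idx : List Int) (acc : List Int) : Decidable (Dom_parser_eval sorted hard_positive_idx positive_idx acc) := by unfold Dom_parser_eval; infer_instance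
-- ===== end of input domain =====

-- B replaces A's three branches of prefix-slice membership scans by one rank number m
-- (first-occurrence index dict) compared against the four thresholds: simpler, one unified loop.
-- Both A and B mutate `acc` in place in Python in the same way; the equivalence proved here is
-- about the returned list (which is that same mutated list).


-- ===== PORT A =====
-- acc[i] += 1 (exact inside Pre_, where the index is in range whenever Python reaches it)
def pvInc (xs : List Int) (i : Nat) : List Int := xs.set i (xs.getD i 0 + 1)

def parser_eval (sorted : List Int) (hard_positive_idx : List Int) (positive_idx : List Int) (acc : List Int) : List Int :=
  if hard_positive_idx.length = 0 then
    let a0 := if positive_idx.all (fun e => (PySem.List.slice sorted none (some 5)).contains e) then pvInc acc 0 else acc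
    let a1 := if positive_idx.all (fun e => (PySem.List.slice sorted none (some 10)).contains e) then pvInc a0 1 else a0
    let a2 := if positive_idx.all (fun e => (PySem.List.slice sorted none (some 20)).contains e) then pvInc a1 2 else a1
    let a3 := if positive_idx.all (fun e => (PySem.List.slice sorted none (some 50)).contains e) then pvInc a2 3 else a2
    a3
  else if hard_positive_idx.length = 1 then
    match hard_positive_idx with
    | [] => acc  -- unreachable: length = 1
    | h :: _ =>
      if (PySem.List.slice sorted none (some 5)).contains h then pvInc (pvInc (pvInc (pvInc acc 0) 1) 2) 3
      else if (PySem.List.slice sorted none (some 10)).contains h then pvInc (pvInc (pvInc acc 1) 2) 3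
      else if (PySem.List.slice sorted none (some 20)).contains h then pvInc (pvInc acc 2) 3
      else if (PySem.List.slice sorted none (some 50)).contains h then pvInc acc 3
      else acc
  else
    let a0 := if hard_positive_idx.any (fun e => (PySem.List.slice sorted none (some 5)).contains e) then pvInc acc 0 else acc
    let a1 := if hard_positive_idx.any (fun e => (PySem.List.slice sorted none (some 10)).contains e) then pvInc a0 1 else a0
    let a2 := if hard_positive_idx.any (fun e => (PySem.List.slice sorted none (some 20)).contains e) then pvInc a1 2 else a1
    let a3 := if hard_positive_idx.any (fun e => (PySem.List.slice sorted none (some 50)).contains e) then pvInc a2 3 else a2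
    a3

-- ===== PORT B =====
-- rank dict step: `if e not in rank: rank[e] = i`
def pvRankStep (d : PySem.Dict Int Int) (p : Int × Nat) : PySem.Dict Int Int :=
  match PySem.Dict.get? d p.1 with
  | some _ => d
  | none => PySem.Dict.insert d p.1 (p.2 : Int)

def pvAbsent : Int := 2 ^ 62

def parser_eval_alt (sorted : List Int) (hard_positive_idx : List Int) (positive_idx : List Int) (acc : List Int) : List Int :=
  let rank := sorted.zipIdx.foldl pvRankStep PySem.Dict.empty
  -- max(gen, default=-1) / min(gen, default=ABSENT) as folds; the defaults never win on a
  -- nonempty list (ranks are ≥ 0 and the min default is the largest possible value)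
  let m : Int :=
    if hard_positive_idx.length = 0 then
      (positive_idx.map (fun e => PySem.Dict.getD rank e pvAbsent)).foldl max (-1)
    else
      (hard_positive_idx.map (fun e => PySem.Dict.getD rank e pvAbsent)).foldl min pvAbsent
  ([(0, 5), (1, 10), (2, 20), (3, 50)] : List (Nat × Int)).foldl
    (fun a p => if m < p.2 then a.set p.1 (a.getD p.1 0 + 1) else a) acc

-- ===== PRECONDITION & SPEC =====
-- Pre_ excludes exactly the inputs on which the Python A raises IndexError: fewer than four
-- counters in `acc` while the @50 condition fires (then `acc[3] += 1` — or an earlier slot — is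
-- out of range); B's Python raises on exactly the same inputs.
def Pre_parser_eval (sorted : List Int) (hard_positive_idx : List Int) (positive_idx : List Int) (acc : List Int) : Prop :=
  4 ≤ acc.length ∨
    (if hard_positive_idx = [] then ¬ (∀ e ∈ positive_idx, e ∈ sorted.take 50)
     else ¬ (∃ e ∈ hard_positive_idx, e ∈ sorted.take 50))
instance (sorted : List Int) (hard_positive_idx : List Int) (positive_idx : List Int) (acc : List Int) : Decidable (Pre_parser_eval sorted hard_positive_idx positive_idx acc) := by unfold Pre_parser_eval; infer_instance

def pvWitness_parser_eval : List Int × List Int × List Int × List Int := ([3, 1, 2], [1], [], [0, 0, 0, 0])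

def Spec_parser_eval (sorted : List Int) (hard_positive_idx : List Int) (positive_idx : List Int) (acc : List Int) (out : List Int) : Prop := out = parser_eval_alt sorted hard_positive_idx positive_idx acc
instance (sorted : List Int) (hard_positive_idx : List Int) (positive_idx : List Int) (acc : List Int) (out : List Int) : Decidable (Spec_parser_eval sorted hard_positive_idx positive_idx acc out) := by unfold Spec_parser_eval; infer_instance

-- ===== CLAIM (what is proved, stated in full; the proofs are below) =====
def Claim_equal_parser_eval : Prop := ∀ (sorted : List Int) (hard_positive_idx : List Int) (positive_idx : List Int) (acc : List Int), Dom_parser_eval sorted hard_positive_idx positive_idx acc → Pre_parser_eval sorted hard_positive_idx positive_idx acc → Spec_parser_eval sorted hard_positive_idx positive_idx acc (parser_eval sorted hard_positive_idx positive_idx acc)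

-- ===== LEMMAS AND PROOFS =====

-- first-occurrence index of e in l
def fIdx (l : List Int) (e : Int) : Option Nat :=
  match l with
  | [] => none
  | a :: t => if a = e then some 0 else (fIdx t e).map (· + 1)

lemma rank_get (l : List Int) (n : Nat) (d : PySem.Dict Int Int) (e : Int) :
    PySem.Dict.get? ((l.zipIdx n).foldl pvRankStep d) e =
      (PySem.Dict.get? d e).or ((fIdx l e).map (fun i => ((i + n : Nat) : Int))) := by
  induction l generalizing n d with
  | nil => simp [fIdx]
  | cons a t ih =>
    simp only [List.zipIdx_cons, List.foldl_cons, fIdx]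
    by_cases hea : a = e
    · subst hea
      cases hd : PySem.Dict.get? d a with
      | some v => simp [pvRankStep, hd, ih, Option.or]
      | none => simp [pvRankStep, hd, ih, PySem.Dict.get?_insert_self, Option.or]
    · cases hd : PySem.Dict.get? d a with
      | some v =>
        simp only [pvRankStep, hd, ih, if_neg hea]
        cases hf : fIdx t e <;> simp [Option.or, add_comm, add_left_comm]
      | none =>
        simp only [pvRankStep, hd, ih, if_neg hea]
        rw [PySem.Dict.get?_insert_of_ne _ _ (fun h => hea h.symm)]
        cases hf : fIdx t e <;> simp [Option.or, add_comm, add_left_comm]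

lemma mem_take_fIdx (l : List Int) (e : Int) (k : Nat) :
    e ∈ l.take k ↔ ∃ i, fIdx l e = some i ∧ i < k := by
  induction l generalizing k with
  | nil => simp [fIdx]
  | cons a t ih =>
    cases k with
    | zero => simp
    | succ k' =>
      by_cases hea : a = e
      · subst hea; simp [fIdx]
      · simp only [List.take_succ_cons, List.mem_cons, fIdx, if_neg hea]
        constructor
        · rintro (h | h)
          · exact absurd h.symm hea
          · obtain ⟨i, hi, hik⟩ := (ih k').mp h
            exact ⟨i + 1, by simp [hi], by omega⟩
        · rintro ⟨i, hi, hik⟩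
          cases hf : fIdx t e with
          | none => simp [hf] at hi
          | some j =>
            simp [hf] at hi
            right; exact (ih k').mpr ⟨j, hf, by omega⟩

lemma R_lt_iff (sorted : List Int) (e : Int) (k : Nat) (hk : (k : Int) < 2 ^ 62) :
    PySem.Dict.getD (sorted.zipIdx.foldl pvRankStep PySem.Dict.empty) e pvAbsent < (k : Int) ↔
      e ∈ sorted.take k := by
  have h := rank_get sorted 0 PySem.Dict.empty e
  rw [mem_take_fIdx]
  cases hf : fIdx sorted e with
  | none =>
    rw [hf] at h
    simp [Option.or] at h
    simp only [PySem.Dict.getD, h, Option.getD_none]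
    constructor
    · intro hlt; exact absurd hlt (by unfold pvAbsent; omega)
    · rintro ⟨i, hi, -⟩; cases hi
  | some i =>
    rw [hf] at h
    simp [Option.or] at h
    simp only [PySem.Dict.getD, h, Option.getD_some]
    constructor
    · intro hlt; exact ⟨i, rfl, by exact_mod_cast hlt⟩
    · rintro ⟨j, hj, hjk⟩; cases hj; exact_mod_cast Int.ofNat_lt.mpr hjk

lemma R_lt_iff' (sorted : List Int) (e : Int) (k : Int) (h0 : 0 ≤ k) (hk : k < 2 ^ 62) :
    PySem.Dict.getD (sorted.zipIdx.foldl pvRankStep PySem.Dict.empty) e pvAbsent < k ↔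
      e ∈ sorted.take k.toNat := by
  have := R_lt_iff sorted e k.toNat (by rw [Int.toNat_of_nonneg h0]; exact hk)
  rwa [Int.toNat_of_nonneg h0] at this

lemma foldl_max_lt (l : List Int) (c k : Int) :
    l.foldl max c < k ↔ c < k ∧ ∀ x ∈ l, x < k := by
  induction l generalizing c with
  | nil => simp
  | cons a t ih =>
    simp only [List.foldl_cons, ih, max_lt_iff, List.mem_cons]
    constructor
    · rintro ⟨⟨h1, h2⟩, h3⟩
      exact ⟨h1, fun x hx => hx.elim (fun h => h ▸ h2) (h3 x)⟩
    · rintro ⟨h1, h2⟩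
      exact ⟨⟨h1, h2 a (Or.inl rfl)⟩, fun x hx => h2 x (Or.inr hx)⟩

lemma foldl_min_lt (l : List Int) (c k : Int) :
    l.foldl min c < k ↔ c < k ∨ ∃ x ∈ l, x < k := by
  induction l generalizing c with
  | nil => simp
  | cons a t ih =>
    simp only [List.foldl_cons, ih, min_lt_iff, List.mem_cons]
    constructor
    · rintro (⟨h | h⟩ | ⟨x, hx, hxk⟩)
      · exact Or.inl h
      · exact Or.inr ⟨a, Or.inl rfl, h⟩
      · exact Or.inr ⟨x, Or.inr hx, hxk⟩
    · rintro (h | ⟨x, rfl | hx, hxk⟩)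
      · exact Or.inl (Or.inl h)
      · exact Or.inl (Or.inr hxk)
      · exact Or.inr ⟨x, hx, hxk⟩

lemma condAll (sorted pos : List Int) (k : Int) (h0 : 0 ≤ k) (hk : k < 2 ^ 62) :
    (pos.all (fun e => (PySem.List.slice sorted none (some k)).contains e) = true) ↔
      (pos.map (fun e => PySem.Dict.getD (sorted.zipIdx.foldl pvRankStep PySem.Dict.empty) e pvAbsent)).foldl max (-1) < k := by
  rw [foldl_max_lt]
  simp only [PySem.List.slice_to _ h0]
  simp only [List.all_eq_true, List.contains_eq_mem, decide_eq_true_eq, List.forall_mem_map]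
  constructor
  · intro h
    exact ⟨by omega, fun e he => (R_lt_iff' sorted e k h0 hk).mpr (h e he)⟩
  · rintro ⟨-, h⟩ e he
    exact (R_lt_iff' sorted e k h0 hk).mp (h e he)

lemma condAny (sorted hard : List Int) (k : Int) (h0 : 0 ≤ k) (hk : k < 2 ^ 62) :
    (hard.any (fun e => (PySem.List.slice sorted none (some k)).contains e) = true) ↔
      (hard.map (fun e => PySem.Dict.getD (sorted.zipIdx.foldl pvRankStep PySem.Dict.empty) e pvAbsent)).foldl min pvAbsent < k := by
  rw [foldl_min_lt]
  simp only [PySem.List.slice_to _ h0]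
  simp only [List.any_eq_true, List.contains_eq_mem, decide_eq_true_eq, List.mem_map]
  constructor
  · rintro ⟨e, he, hm⟩
    exact Or.inr ⟨_, ⟨e, he, rfl⟩, (R_lt_iff' sorted e k h0 hk).mpr hm⟩
  · rintro (h | ⟨x, ⟨e, he, rfl⟩, hm⟩)
    · exact absurd h (by unfold pvAbsent; omega)
    · exact ⟨e, he, (R_lt_iff' sorted e k h0 hk).mp hm⟩

lemma condOne (sorted : List Int) (h : Int) (k : Int) (h0 : 0 ≤ k) (hk : k < 2 ^ 62) :
    ((PySem.List.slice sorted none (some k)).contains h = true) ↔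
      (([h]).map (fun e => PySem.Dict.getD (sorted.zipIdx.foldl pvRankStep PySem.Dict.empty) e pvAbsent)).foldl min pvAbsent < k := by
  have := condAny sorted [h] k h0 hk
  simpa using this

-- ===== VERDICT (by name: the statement is the Claim_ definition above) =====
theorem parser_eval_spec : Claim_equal_parser_eval := by
  unfold Claim_equal_parser_eval
  intro sorted hard pos acc _ _
  unfold Spec_parser_eval parser_eval parser_eval_alt
  by_cases hl0 : hard.length = 0
  · simp only [if_pos hl0, List.foldl_cons, List.foldl_nil, pvInc,
      condAll sorted pos 5 (by norm_num) (by norm_num),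
      condAll sorted pos 10 (by norm_num) (by norm_num),
      condAll sorted pos 20 (by norm_num) (by norm_num),
      condAll sorted pos 50 (by norm_num) (by norm_num)]
  · by_cases hl1 : hard.length = 1
    · match hard, hl1 with
      | [h], _ =>
        simp only [if_neg (by simp : ¬([h] : List Int).length = 0),
          List.foldl_cons, List.foldl_nil, pvInc,
          condOne sorted h 5 (by norm_num) (by norm_num),
          condOne sorted h 10 (by norm_num) (by norm_num),
          condOne sorted h 20 (by norm_num) (by norm_num),
          condOne sorted h 50 (by norm_num) (by norm_num), List.map_cons, List.map_nil]
        set m := min pvAbsent (PySem.Dict.getD (sorted.zipIdx.foldl pvRankStep PySem.Dict.empty) h pvAbsent) with hm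
        by_cases c5 : m < 5 <;> by_cases c10 : m < 10 <;> by_cases c20 : m < 20 <;> by_cases c50 : m < 50 <;>
          first
          | omega
          | simp [c5, c10, c20, c50]
    · simp only [if_neg hl0, if_neg hl1, List.foldl_cons, List.foldl_nil, pvInc,
        condAny sorted hard 5 (by norm_num) (by norm_num),
        condAny sorted hard 10 (by norm_num) (by norm_num),
        condAny sorted hard 20 (by norm_num) (by norm_num),
        condAny sorted hard 50 (by norm_num) (by norm_num)]
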